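-- pv_equiv track=rewrite | github.com/Gabriel-Cordeiro-da-Silva/credit-card-validator | src/validator.py | validar_cartao
-- ===== SOURCE A (Python) =====
-- def validar_cartao(numero_cartao):
--     numero_cartao = numero_cartao.replace(" ", "").replace("-", "") # removendo espaços e traços do número do cartão
--
--     if not numero_cartao.isdigit() or len(numero_cartao) < 13 or len(numero_cartao) > 19:
--         return "Número de cartão inválido. Deve conter entre 13 e 19 dígitos."
--
--     # Algoritmo de Luhn para validação
--     soma = 0
--     alternar = False
--     for digito in reversed(numero_cartao):
--         d = int(digito)
--         if alternar:
--             d *= 2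
--             if d > 9:
--                 d -= 9
--         soma += d
--         alternar = not alternar
--
--     if soma % 10 != 0:
--         return "Número de cartão inválido."
--
--     # Identificação da bandeira conforme critério em data > base.png
--     if numero_cartao.startswith(("34", "37")):
--         return "Bandeira: American Express"
--     elif numero_cartao.startswith(("51", "52", "53", "54", "55")):
--         return "Bandeira: MasterCard"
--     elif numero_cartao.startswith("4"):
--         return "Bandeira: Visa"
--     elif numero_cartao.startswith("6011") or numero_cartao.startswith("65"):
--         return "Bandeira: Discover"
--     else:
--         return "Bandeira desconhecida."
-- ===== SOURCE B (Python) =====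
-- DOBRO = [0, 2, 4, 6, 8, 1, 3, 5, 7, 9]  # valor de um digito dobrado no Luhn (2*d, -9 se > 9)
--
-- TABELA = [
--     (("34", "37"), "Bandeira: American Express"),
--     (("51", "52", "53", "54", "55"), "Bandeira: MasterCard"),
--     (("4",), "Bandeira: Visa"),
--     (("6011", "65"), "Bandeira: Discover"),
-- ]
--
--
-- def _soma_luhn(ds):
--     # ds: digitos da direita para a esquerda; consome dois por vez:
--     # o primeiro entra puro, o segundo via tabela de dobro.
--     if not ds:
--         return 0
--     if len(ds) == 1:
--         return ds[0]
--     return ds[0] + DOBRO[ds[1]] + _soma_luhn(ds[2:])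
--
--
-- def validar_cartao(numero_cartao):
--     n = numero_cartao.replace(" ", "").replace("-", "")
--
--     if not n.isdigit() or len(n) < 13 or len(n) > 19:
--         return "Número de cartão inválido. Deve conter entre 13 e 19 dígitos."
--
--     if _soma_luhn([int(c) for c in reversed(n)]) % 10 != 0:
--         return "Número de cartão inválido."
--
--     for prefixos, bandeira in TABELA:
--         if n.startswith(prefixos):
--             return bandeira
--     return "Bandeira desconhecida."
-- ===== Notes on version B (the rewrite author's own statement) =====
-- stated objective: alternative
-- what changed: Replaces the flag-alternating Luhn loop by a two-at-a-time recursion over the reversed digits with a precomputed doubled-digit lookup table, and replaces the hard-coded brand if-cascade by a first-match scan over a prefix table.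
import Mathlib
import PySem

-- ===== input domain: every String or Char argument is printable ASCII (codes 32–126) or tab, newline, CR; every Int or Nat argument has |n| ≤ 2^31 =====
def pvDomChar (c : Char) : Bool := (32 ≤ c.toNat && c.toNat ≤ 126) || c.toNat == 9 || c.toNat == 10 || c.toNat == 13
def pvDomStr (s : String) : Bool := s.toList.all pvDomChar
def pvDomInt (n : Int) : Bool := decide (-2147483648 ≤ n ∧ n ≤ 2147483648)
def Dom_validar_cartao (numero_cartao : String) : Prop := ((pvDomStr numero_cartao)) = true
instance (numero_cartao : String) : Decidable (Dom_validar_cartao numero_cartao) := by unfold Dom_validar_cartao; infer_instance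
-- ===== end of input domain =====

-- ===== PORT A =====
-- B replaces A's flag-alternating Luhn loop by a two-at-a-time recursion with a doubled-digit
-- lookup table and the brand if-cascade by a prefix-table scan (alternative decomposition, same cost).

-- int(c) for a single character; exact for the digit characters the isdigit guard admits
-- (both Pythons only ever apply int() to characters after that guard).
def pvDigit (c : Char) : Int := (c.toNat : Int) - 48

-- the 'for digito in reversed(...)' loop of A, state (alternar, soma)
def pvLuhnA : List Char → Bool → Int → Int
  | [], _, soma => soma
  | digito :: rest, alternar, soma =>
    let d := pvDigit digito
    let d := if alternar then (if d * 2 > 9 then d * 2 - 9 else d * 2) else d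
    pvLuhnA rest (!alternar) (soma + d)

def validar_cartao (numero_cartao : String) : String :=
  let n := PySem.Str.replace (PySem.Str.replace numero_cartao " " "") "-" ""
  if !PySem.Str.strIsdigit n || decide (PySem.Str.len n < 13) || decide (PySem.Str.len n > 19) then
    "Número de cartão inválido. Deve conter entre 13 e 19 dígitos."
  else if PySem.Int.mod (pvLuhnA n.toList.reverse false 0) 10 ≠ 0 then
    "Número de cartão inválido."
  else if PySem.Str.startswith n "34" || PySem.Str.startswith n "37" then
    "Bandeira: American Express"
  else if PySem.Str.startswith n "51" || PySem.Str.startswith n "52" || PySem.Str.startswith n "53" || PySem.Str.startswith n "54" || PySem.Str.startswith n "55" then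
    "Bandeira: MasterCard"
  else if PySem.Str.startswith n "4" then
    "Bandeira: Visa"
  else if PySem.Str.startswith n "6011" || PySem.Str.startswith n "65" then
    "Bandeira: Discover"
  else
    "Bandeira desconhecida."

-- ===== PORT B =====
def pvDOBRO : List Int := [0, 2, 4, 6, 8, 1, 3, 5, 7, 9]

def pvTABELA : List (List String × String) :=
  [(["34", "37"], "Bandeira: American Express"),
   (["51", "52", "53", "54", "55"], "Bandeira: MasterCard"),
   (["4"], "Bandeira: Visa"),
   (["6011", "65"], "Bandeira: Discover")]

-- _soma_luhn: DOBRO[ds[1]] is in range for every digit list the guard admits (pyGetD default unreached)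
def pvSomaLuhn : List Int → Int
  | [] => 0
  | [d] => d
  | d :: e :: rest => d + PySem.List.pyGetD pvDOBRO e 0 + pvSomaLuhn rest

def validar_cartao_alt (numero_cartao : String) : String :=
  let n := PySem.Str.replace (PySem.Str.replace numero_cartao " " "") "-" ""
  if !PySem.Str.strIsdigit n || decide (PySem.Str.len n < 13) || decide (PySem.Str.len n > 19) then
    "Número de cartão inválido. Deve conter entre 13 e 19 dígitos."
  else if PySem.Int.mod (pvSomaLuhn (n.toList.reverse.map pvDigit)) 10 ≠ 0 then
    "Número de cartão inválido."
  else
    -- the 'for prefixos, bandeira in TABELA' first-match loop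
    match pvTABELA.find? (fun e => e.1.any (fun p => PySem.Str.startswith n p)) with
    | some e => e.2
    | none => "Bandeira desconhecida."

-- ===== PRECONDITION & SPEC =====
def Spec_validar_cartao (numero_cartao : String) (out : String) : Prop := out = validar_cartao_alt numero_cartao
instance (numero_cartao : String) (out : String) : Decidable (Spec_validar_cartao numero_cartao out) := by unfold Spec_validar_cartao; infer_instance

-- ===== CLAIM (what is proved, stated in full; the proofs are below) =====
def Claim_equal_validar_cartao : Prop := ∀ (numero_cartao : String), Dom_validar_cartao numero_cartao → Spec_validar_cartao numero_cartao (validar_cartao numero_cartao)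

-- ===== LEMMAS AND PROOFS =====

-- the doubled-digit table agrees with A's *2 / -9 arithmetic on digit values
lemma dobro_eq (d : Int) (h0 : 0 ≤ d) (h9 : d ≤ 9) :
    (if d * 2 > 9 then d * 2 - 9 else d * 2) = PySem.List.pyGetD pvDOBRO d 0 := by
  interval_cases d <;> decide

lemma isdigit_bounds (c : Char) (h : PySem.Chars.isdigit c = true) :
    48 ≤ c.toNat ∧ c.toNat ≤ 57 := by
  simp only [PySem.Chars.isdigit, Bool.and_eq_true, decide_eq_true_eq, Char.le_def,
    UInt32.le_iff_toNat_le] at h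
  exact h

-- A's alternating loop equals B's two-at-a-time recursion, on digit characters
lemma luhnA_eq_somaLuhn : ∀ (k : Nat) (l : List Char), l.length ≤ k →
    (∀ c ∈ l, PySem.Chars.isdigit c = true) →
    ∀ soma : Int, pvLuhnA l false soma = soma + pvSomaLuhn (l.map pvDigit) := by
  intro k
  induction k with
  | zero =>
    intro l hl _ soma
    have : l = [] := List.eq_nil_of_length_eq_zero (Nat.le_zero.mp hl)
    subst this; simp [pvLuhnA, pvSomaLuhn]
  | succ k ih =>
    intro l hl hd soma
    match l with
    | [] => simp [pvLuhnA, pvSomaLuhn]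
    | [c] => simp [pvLuhnA, pvSomaLuhn]
    | c :: c2 :: rest =>
      have hb := isdigit_bounds c2 (hd c2 (by simp))
      have hdig : 0 ≤ pvDigit c2 ∧ pvDigit c2 ≤ 9 := by unfold pvDigit; omega
      have hrest : ∀ c ∈ rest, PySem.Chars.isdigit c = true := fun c hc => hd c (by simp [hc])
      have hlen : rest.length ≤ k := by simp at hl; omega
      simp only [pvLuhnA, Bool.not_false, Bool.not_true, Bool.false_eq_true,
        if_false, if_true, List.map_cons, pvSomaLuhn, ih rest hlen hrest]
      rw [← dobro_eq (pvDigit c2) hdig.1 hdig.2]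
      generalize (if pvDigit c2 * 2 > 9 then pvDigit c2 * 2 - 9 else pvDigit c2 * 2) = y
      omega

-- A's brand if-cascade equals B's first-match table scan (same conditions, same order)
lemma brand_eq (n : String) :
    (if PySem.Str.startswith n "34" || PySem.Str.startswith n "37" then
      "Bandeira: American Express"
    else if PySem.Str.startswith n "51" || PySem.Str.startswith n "52" || PySem.Str.startswith n "53" || PySem.Str.startswith n "54" || PySem.Str.startswith n "55" then
      "Bandeira: MasterCard"
    else if PySem.Str.startswith n "4" then
      "Bandeira: Visa"
    else if PySem.Str.startswith n "6011" || PySem.Str.startswith n "65" then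
      "Bandeira: Discover"
    else
      "Bandeira desconhecida.") =
    (match pvTABELA.find? (fun e => e.1.any (fun p => PySem.Str.startswith n p)) with
     | some e => e.2
     | none => "Bandeira desconhecida.") := by
  simp only [pvTABELA, List.find?, List.any_cons, List.any_nil, Bool.or_false]
  generalize PySem.Str.startswith n "34" = b1
  generalize PySem.Str.startswith n "37" = b2
  generalize PySem.Str.startswith n "51" = b3
  generalize PySem.Str.startswith n "52" = b4
  generalize PySem.Str.startswith n "53" = b5
  generalize PySem.Str.startswith n "54" = b6
  generalize PySem.Str.startswith n "55" = b7
  generalize PySem.Str.startswith n "4" = b8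
  generalize PySem.Str.startswith n "6011" = b9
  generalize PySem.Str.startswith n "65" = b10
  revert b1 b2 b3 b4 b5 b6 b7 b8 b9 b10
  decide

-- ===== VERDICT (by name: the statement is the Claim_ definition above) =====
theorem validar_cartao_spec : Claim_equal_validar_cartao := by
  intro s _
  unfold Spec_validar_cartao validar_cartao validar_cartao_alt
  set n := PySem.Str.replace (PySem.Str.replace s " " "") "-" "" with hn
  by_cases hg : (!PySem.Str.strIsdigit n || decide (PySem.Str.len n < 13) || decide (PySem.Str.len n > 19)) = true
  · simp only [hg, if_true]
  · rw [Bool.not_eq_true] at hg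
    have hdig : PySem.Str.strIsdigit n = true := by
      rcases Bool.or_eq_false_iff.mp hg with ⟨h1, _⟩
      rcases Bool.or_eq_false_iff.mp h1 with ⟨h2, _⟩
      simpa using h2
    have hall : ∀ c ∈ n.toList.reverse, PySem.Chars.isdigit c = true := by
      intro c hc
      rw [List.mem_reverse] at hc
      have h' : PySem.Chars.strIsdigit n.toList = true := by simpa using hdig
      simp only [PySem.Chars.strIsdigit, Bool.and_eq_true, List.all_eq_true] at h'
      exact h'.2 c hc
    have hsum := luhnA_eq_somaLuhn n.toList.reverse.length n.toList.reverse le_rfl hall 0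
    simp only [hg, Bool.false_eq_true, if_false, hsum, zero_add]
    by_cases hm : PySem.Int.mod (pvSomaLuhn (List.map pvDigit n.toList.reverse)) 10 ≠ 0
    · simp only [if_pos hm]
    · simp only [if_neg hm]
      exact brand_eq n
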